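-- pv_equiv track=rewrite | github.com/kwcooper/neuroPack | Utils/lfp_funcs.py | ripples_per_sec
-- ===== SOURCE A (Python) =====
-- def ripples_per_sec(lfp, lot, fs):
-- 	rps = []
-- 	rc = 0
-- 	for i in range(len(lfp)):
-- 		if i % fs != 0:
-- 			if i in lot:
-- 				rc += 1
-- 		else:
-- 			rps.append(rc)
-- 			rc = 0
-- 	return rps
-- ===== SOURCE B (Python) =====
-- def ripples_per_sec(lfp, lot, fs):
--     n = len(lfp)
--     if n == 0:
--         return []
--     step = abs(fs)
--     counts = {}
--     for x in set(lot):
--         if 0 < x < n and x % step != 0: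
--             w = x // step
--             counts[w] = counts.get(w, 0) + 1
--     return [0] + [counts.get(k, 0) for k in range((n - 1) // step)]
-- ===== Notes on version B (the rewrite author's own statement) =====
-- stated objective: faster
-- what changed: Instead of scanning lot for every index i (nested membership test per sample), B makes one pass over set(lot) bucketing each event by its window index x//abs(fs) into a dict, then emits [0] plus the bucket counts for the full windows.
import Mathlib
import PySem

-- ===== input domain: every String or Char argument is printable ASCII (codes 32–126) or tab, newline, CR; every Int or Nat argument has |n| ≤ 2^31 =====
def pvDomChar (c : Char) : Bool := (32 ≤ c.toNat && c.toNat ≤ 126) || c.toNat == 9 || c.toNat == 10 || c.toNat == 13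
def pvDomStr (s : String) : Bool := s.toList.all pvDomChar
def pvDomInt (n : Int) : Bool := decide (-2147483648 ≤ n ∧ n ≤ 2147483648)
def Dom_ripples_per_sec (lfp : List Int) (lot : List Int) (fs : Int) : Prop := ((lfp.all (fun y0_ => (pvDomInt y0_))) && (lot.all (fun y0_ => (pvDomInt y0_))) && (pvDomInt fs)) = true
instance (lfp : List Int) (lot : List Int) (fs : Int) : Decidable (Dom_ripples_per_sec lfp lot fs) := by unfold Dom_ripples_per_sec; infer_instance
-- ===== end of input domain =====

-- ===== PORT A =====
-- B buckets events by window in one pass over set(lot) instead of A's per-index scan of lot; equivalence proved for fs ≠ 0 or empty lfp (otherwise A raises ZeroDivisionError).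
def ripples_per_sec (lfp : List Int) (lot : List Int) (fs : Int) : List Int :=
  ((PySem.List.pyRange 0 lfp.length 1).foldl
    (fun (st : List Int × Int) i =>
      if PySem.Int.mod i fs ≠ 0 then
        (if lot.contains i then (st.1, st.2 + 1) else st)
      else
        (st.1 ++ [st.2], 0))
    ([], 0)).1

-- ===== PORT B =====
def ripples_per_sec_alt (lfp : List Int) (lot : List Int) (fs : Int) : List Int :=
  let n : Int := lfp.length
  if n = 0 then []
  else
    let step : Int := |fs|
    let counts : PySem.Dict Int Int :=
      (PySem.Set.ofList lot).foldl
        (fun d x =>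
          if 0 < x ∧ x < n ∧ PySem.Int.mod x step ≠ 0 then
            d.modify (PySem.Int.floordiv x step) 0 (· + 1)
          else d)
        PySem.Dict.empty
    0 :: (PySem.List.pyRange 0 (PySem.Int.floordiv (n - 1) step) 1).map
          (fun k => counts.getD k 0)

-- ===== PRECONDITION & SPEC =====
-- Pre_ excludes exactly the inputs where A raises ZeroDivisionError (fs = 0 with a nonempty lfp).
def Pre_ripples_per_sec (lfp : List Int) (lot : List Int) (fs : Int) : Prop := lfp = [] ∨ fs ≠ 0
instance (lfp : List Int) (lot : List Int) (fs : Int) : Decidable (Pre_ripples_per_sec lfp lot fs) := by unfold Pre_ripples_per_sec; infer_instance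
def pvWitness_ripples_per_sec : List Int × List Int × Int := ([4, 1, 0, 2, 5, 3], [1, 3, 4], 2)
def Spec_ripples_per_sec (lfp : List Int) (lot : List Int) (fs : Int) (out : List Int) : Prop := out = ripples_per_sec_alt lfp lot fs
instance (lfp : List Int) (lot : List Int) (fs : Int) (out : List Int) : Decidable (Spec_ripples_per_sec lfp lot fs out) := by unfold Spec_ripples_per_sec; infer_instance

-- ===== CLAIM (what is proved, stated in full; the proofs are below) =====
def Claim_equal_ripples_per_sec : Prop := ∀ (lfp : List Int) (lot : List Int) (fs : Int), Dom_ripples_per_sec lfp lot fs → Pre_ripples_per_sec lfp lot fs → Spec_ripples_per_sec lfp lot fs (ripples_per_sec lfp lot fs)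

-- ===== LEMMAS AND PROOFS =====

/-- number of indices i in [a, b) with i ∈ lot -/
def cnt (lot : List Int) (a b : Int) : Int :=
  (((PySem.List.pyRange a b 1).filter (fun i => lot.contains i)).length : Int)

/-- the window-count list A has emitted after scanning indices 0..n-1 (s = |fs|) -/
def Fspec (lot : List Int) (s n : Nat) : List Int :=
  if n = 0 then []
  else 0 :: (List.range ((n - 1) / s)).map
    (fun j => cnt lot ((j * s : Nat) + 1) (((j + 1) * s : Nat)))

/-- A's running counter after scanning indices 0..n-1 -/
def Rspec (lot : List Int) (s n : Nat) : Int :=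
  if n = 0 then 0 else cnt lot (((n - 1) / s * s : Nat) + 1) (n : Nat)

lemma cnt_self (lot : List Int) (a : Int) : cnt lot a a = 0 := by
  simp [cnt, PySem.List.pyRange_one_eq_nil le_rfl]

lemma cnt_succ (lot : List Int) (a b : Int) (h : a ≤ b) :
    cnt lot a (b + 1) = cnt lot a b + (if lot.contains b then 1 else 0) := by
  rw [cnt, PySem.List.pyRange_one_succ_right h, List.filter_append]
  by_cases hb : b ∈ lot <;> simp [cnt, hb]

lemma div_pred_of_dvd (s k : Nat) (hs : 0 < s) :
    (s * (k + 1) - 1) / s = k := by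
  have h1 : s * (k + 1) = k * s + s := by ring
  apply Nat.div_eq_of_lt_le
  · omega
  · have h2 : (k + 1) * s = k * s + s := by ring
    rw [h2]; omega

lemma div_pred_of_not_dvd (s n : Nat) (hs : 0 < s) (h : ¬ s ∣ n) :
    (n - 1) / s = n / s := by
  have hn : 0 < n := Nat.pos_of_ne_zero (fun h0 => h (h0 ▸ dvd_zero s))
  apply Nat.div_eq_of_lt_le
  · have h1 : n / s * s ≤ n := Nat.div_mul_le_self n s
    have h2 : n / s * s ≠ n := fun he => h (Dvd.intro_left _ he)
    omega
  · have e := Nat.div_add_mod n s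
    have ml : n % s < s := Nat.mod_lt n hs
    have h3 : (n / s + 1) * s = s * (n / s) + s := by ring
    omega

/-- A's fold, characterised. -/
lemma foldA_eq (lot : List Int) (fs : Int) (hfs : fs ≠ 0) (n : Nat) :
    (PySem.List.pyRange 0 (n : Int) 1).foldl
      (fun (st : List Int × Int) i =>
        if PySem.Int.mod i fs ≠ 0 then
          (if lot.contains i then (st.1, st.2 + 1) else st)
        else
          (st.1 ++ [st.2], 0))
      ([], 0)
    = (Fspec lot fs.natAbs n, Rspec lot fs.natAbs n) := by
  set s := fs.natAbs with hsdef
  have hs : 0 < s := Int.natAbs_pos.mpr hfs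
  induction n with
  | zero => simp [PySem.List.pyRange_one_eq_nil le_rfl, Fspec, Rspec]
  | succ n ih =>
    have hcast : ((n + 1 : Nat) : Int) = (n : Int) + 1 := by push_cast; ring
    rw [hcast, PySem.List.pyRange_one_succ_right (by positivity), List.foldl_append, ih]
    simp only [List.foldl_cons, List.foldl_nil]
    have hmod : (PySem.Int.mod (n : Int) fs = 0) ↔ s ∣ n := by
      rw [PySem.Int.mod_eq_zero_iff_dvd, ← Int.natAbs_dvd, ← hsdef]
      exact Int.natCast_dvd_natCast
    by_cases hdvd : s ∣ n
    · rw [if_neg (by simp [hmod, hdvd])]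
      rcases Nat.eq_zero_or_pos n with h0 | h0
      · subst h0
        simp [Fspec, Rspec, Nat.zero_div, cnt_self]
      · obtain ⟨m, hm⟩ := hdvd
        have hmpos : 0 < m := by
          rcases Nat.eq_zero_or_pos m with h | h
          · subst h; simp at hm; omega
          · exact h
        have hd1 : (n - 1) / s = m - 1 := by
          have h' := div_pred_of_dvd s (m - 1) hs
          rw [Nat.sub_add_cancel hmpos] at h'
          rw [hm]; exact h'
        have hd2 : (n + 1 - 1) / s = m := by
          simp [hm, Nat.mul_div_cancel_left m hs]
        have hn' : n = (m - 1 + 1) * s := by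
          rw [Nat.sub_add_cancel hmpos, Nat.mul_comm]; exact hm
        have hRg : Rspec lot s n = cnt lot (((m - 1) * s : Nat) + 1) (((m - 1 + 1) * s : Nat)) := by
          simp only [Rspec, if_neg (show ¬ n = 0 by omega), hd1]
          rw [← hn']
        simp only [Prod.mk.injEq]
        refine ⟨?_, ?_⟩
        · simp only [Fspec, if_neg (show ¬ n = 0 by omega), if_neg (show ¬ n + 1 = 0 by omega),
            hd1, hd2]
          rw [show m = (m - 1) + 1 by omega, List.range_succ, List.map_append]
          simp only [List.map_cons, List.map_nil, List.cons_append]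
          rw [hRg]
          simp
        · simp only [Rspec, if_neg (show ¬ n + 1 = 0 by omega), hd2]
          have he : ((m * s : Nat) : Int) + 1 = ((n + 1 : Nat) : Int) := by
            push_cast [hm]; ring
          rw [he, cnt_self]
    · rw [if_pos (by simp [hmod, hdvd])]
      have hn : 0 < n := Nat.pos_of_ne_zero (fun h0 => hdvd (h0 ▸ dvd_zero s))
      have hd : (n + 1 - 1) / s = (n - 1) / s := by
        simp [div_pred_of_not_dvd s n hs hdvd]
      have hF : Fspec lot s (n + 1) = Fspec lot s n := by
        simp only [Fspec, if_neg (show ¬ n = 0 by omega), if_neg (show ¬ n + 1 = 0 by omega), hd]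
      have hR : Rspec lot s (n + 1) = Rspec lot s n + (if (n : Int) ∈ lot then 1 else 0) := by
        simp only [Rspec, if_neg (show ¬ n = 0 by omega), if_neg (show ¬ n + 1 = 0 by omega), hd]
        have hle : (((n - 1) / s * s : Nat) : Int) + 1 ≤ (n : Int) := by
          have h1 : (n - 1) / s * s ≤ n - 1 := Nat.div_mul_le_self _ _
          omega
        have hc : ((n + 1 : Nat) : Int) = (n : Int) + 1 := by push_cast; ring
        rw [hc, cnt_succ lot _ _ hle]
        by_cases hcm : (n : Int) ∈ lot <;> simp [hcm]
      by_cases hc : (n : Int) ∈ lot <;> simp [hc, hF, hR]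

lemma foldl_if_modify (l : List Int) (n step : Int) (d : PySem.Dict Int Int) :
    l.foldl
      (fun d x =>
        if 0 < x ∧ x < n ∧ PySem.Int.mod x step ≠ 0 then
          d.modify (PySem.Int.floordiv x step) 0 (· + 1)
        else d) d
    = ((l.filter (fun x => decide (0 < x ∧ x < n ∧ PySem.Int.mod x step ≠ 0))).map
        (fun x => PySem.Int.floordiv x step)).foldl
        (fun d x => d.modify x 0 (· + 1)) d := by
  induction l generalizing d with
  | nil => rfl
  | cons a l ih =>
    by_cases h : 0 < a ∧ a < n ∧ PySem.Int.mod a step ≠ 0 <;>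
      simp [h, ih]

lemma count_interval (lot : List Int) (a b : Int) :
    (((PySem.Set.ofList lot).filter (fun x => decide (a < x ∧ x < b))).length : Int)
      = cnt lot (a + 1) b := by
  rw [cnt]
  congr 1
  apply List.Perm.length_eq
  rw [List.perm_ext_iff_of_nodup
    (List.Nodup.filter _ (PySem.Set.nodup_ofList lot))
    (List.Nodup.filter _ (PySem.List.nodup_pyRange_one (a + 1) b))]
  intro x
  simp [List.mem_filter, PySem.Set.mem_ofList, PySem.List.mem_pyRange_one]
  constructor
  · rintro ⟨hmem, h1, h2⟩; exact ⟨⟨by omega, h2⟩, hmem⟩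
  · rintro ⟨⟨h1, h2⟩, hmem⟩; exact ⟨hmem, by omega, h2⟩

/-- The bucket condition is exactly the open window interval, for full windows. -/
lemma cond_iff (n : Int) (s j : Nat) (hs : 0 < s) (hj : j + 1 ≤ (n.toNat - 1) / s)
    (hn : 1 ≤ n) (x : Int) :
    (0 < x ∧ x < n ∧ PySem.Int.mod x (s : Int) ≠ 0 ∧ PySem.Int.floordiv x (s : Int) = (j : Int))
    ↔ ((j : Int) * s < x ∧ x < ((j : Int) + 1) * s) := by
  have hspos : (0 : Int) < (s : Int) := by exact_mod_cast hs
  constructor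
  · rintro ⟨hx0, hxn, hmod, hdiv⟩
    have hb := (PySem.Int.floordiv_eq_iff_of_pos hspos).mp hdiv
    have hm := PySem.Int.floordiv_mul_add_mod x (s : Int)
    rw [hdiv] at hm
    have hnn : 0 ≤ PySem.Int.mod x (s : Int) := PySem.Int.mod_nonneg x hspos
    have hpos : 0 < PySem.Int.mod x (s : Int) := lt_of_le_of_ne hnn (Ne.symm hmod)
    exact ⟨by linarith, by linarith [hb.2]⟩
  · rintro ⟨h1, h2⟩
    have hjs : (0 : Int) ≤ (j : Int) * s := by positivity
    have hdiv : PySem.Int.floordiv x (s : Int) = (j : Int) := by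
      rw [PySem.Int.floordiv_eq_iff_of_pos hspos]
      exact ⟨le_of_lt h1, h2⟩
    have hm := PySem.Int.floordiv_mul_add_mod x (s : Int)
    rw [hdiv] at hm
    refine ⟨by linarith, ?_, ?_, hdiv⟩
    · have hmul : (j + 1) * s ≤ ((n.toNat - 1) / s) * s := Nat.mul_le_mul_right s hj
      have hle : ((n.toNat - 1) / s) * s ≤ n.toNat - 1 := Nat.div_mul_le_self _ _
      have hNat : (j + 1) * s ≤ n.toNat - 1 := hmul.trans hle
      have hInt : (((j + 1) * s : Nat) : Int) ≤ ((n.toNat - 1 : Nat) : Int) :=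
        Int.ofNat_le.mpr hNat
      have h1n : (1 : Nat) ≤ n.toNat := by omega
      rw [Nat.cast_sub h1n] at hInt
      push_cast at hInt
      have htn : ((n.toNat : Nat) : Int) = n := Int.toNat_of_nonneg (by omega)
      rw [htn] at hInt
      linarith
    · intro hz
      rw [hz] at hm
      omega

lemma altB_eq (lfp : List Int) (lot : List Int) (fs : Int) (hfs : fs ≠ 0) :
    ripples_per_sec_alt lfp lot fs = Fspec lot fs.natAbs lfp.length := by
  set s := fs.natAbs with hsdef
  have hs : 0 < s := Int.natAbs_pos.mpr hfs
  have habs : |fs| = (s : Int) := Int.abs_eq_natAbs fs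
  unfold ripples_per_sec_alt
  simp only [habs]
  by_cases h0 : (lfp.length : Int) = 0
  · have hl0 : lfp.length = 0 := by exact_mod_cast h0
    simp [Fspec, hl0]
  · have hl1 : 1 ≤ lfp.length := by
      rcases Nat.eq_zero_or_pos lfp.length with h | h
      · exact absurd (by exact_mod_cast h : (lfp.length : Int) = 0) h0
      · exact h
    rw [if_neg h0]
    have hsub : (lfp.length : Int) - 1 = ((lfp.length - 1 : Nat) : Int) := by
      push_cast [Nat.cast_sub hl1]; ring
    have hfd : PySem.Int.floordiv ((lfp.length : Int) - 1) (s : Int)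
        = (((lfp.length - 1) / s : Nat) : Int) := by
      rw [hsub]; exact_mod_cast PySem.Int.floordiv_natCast (lfp.length - 1) s
    rw [hfd, PySem.List.pyRange_zero_nat, List.map_map]
    simp only [Fspec, if_neg (show ¬ lfp.length = 0 by omega)]
    congr 1
    apply List.map_congr_left
    intro j hj
    have hjq : j + 1 ≤ (lfp.length - 1) / s := by
      rw [List.mem_range] at hj; omega
    simp only [Function.comp]
    rw [foldl_if_modify]
    rw [PySem.Dict.getD_foldl_modify_add_one, PySem.Dict.getD_empty, zero_add]
    have hiff := fun x => cond_iff (lfp.length : Int) s j hs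
      (by simpa using hjq) (by exact_mod_cast hl1) x
    have hcount : (((PySem.Set.ofList lot).filter
          (fun x => decide (0 < x ∧ x < (lfp.length : Int) ∧ PySem.Int.mod x (s : Int) ≠ 0))).map
            (fun x => PySem.Int.floordiv x (s : Int))).count ((j : Nat) : Int)
        = (PySem.Set.ofList lot).countP
            (fun x => decide ((j : Int) * s < x ∧ x < ((j : Int) + 1) * s)) := by
      unfold List.count
      rw [List.countP_map, List.countP_filter]
      apply List.countP_congr
      intro x _
      rw [Bool.eq_iff_iff]
      simp only [Function.comp, beq_iff_eq, Bool.and_eq_true, decide_eq_true_eq]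
      rw [← hiff x]
      tauto
    rw [hcount, List.countP_eq_length_filter,
      count_interval lot ((j : Int) * s) (((j : Int) + 1) * s)]
    show cnt lot ((j : Int) * s + 1) (((j : Int) + 1) * s) = _
    congr 1

theorem ripples_per_sec_spec : Claim_equal_ripples_per_sec := by
  intro lfp lot fs _ hpre
  unfold Spec_ripples_per_sec
  rcases hpre with hnil | hfs
  · subst hnil
    simp [ripples_per_sec, ripples_per_sec_alt, PySem.List.pyRange_one_eq_nil le_rfl]
  · show ripples_per_sec lfp lot fs = _
    unfold ripples_per_sec
    rw [foldA_eq lot fs hfs lfp.length, altB_eq lfp lot fs hfs]
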